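-- pv_equiv track=rewrite | github.com/jhuseman/VideoPlayer | WebHost/WebHost.py | get_possible_split_url_params
-- ===== SOURCE A (Python) =====
-- def get_possible_split_url_params(url):
-- 	ret = []
-- 	split_url = url.split('/')
-- 	remaining = split_url
-- 	removed = []
-- 	while len(remaining)>0:
-- 		prefix = '/'.join(remaining)
-- 		param_count = len(split_url)-len(remaining)
-- 		params = removed[:param_count]
-- 		if (prefix+'/')==url:
-- 			ret.append((prefix, param_count, params))
-- 			param_count = param_count-1
-- 			params = removed[:param_count]
-- 		ret.append((prefix, param_count, params))
-- 		removed = [remaining[-1]] + removed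
-- 		remaining = remaining[:-1]
-- 	return ret
-- ===== SOURCE B (Python) =====
-- def get_possible_split_url_params(url):
-- 	parts = url.split('/')
-- 	n = len(parts)
-- 	ret = [('/'.join(parts[:i]), n - i, parts[i:]) for i in range(n, 0, -1)]
-- 	if n >= 2 and parts[-1] == '':
-- 		ret.insert(2, ('/'.join(parts[:-1]), 0, []))
-- 	return ret
-- ===== Notes on version B (the rewrite author's own statement) =====
-- stated objective: simpler
-- what changed: Replaces A's while-loop with mutable remaining/removed accumulators by a single list comprehension over prefix lengths (each tuple computed directly from index slices) plus one positional insert for the trailing-slash special case.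
import Mathlib
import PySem

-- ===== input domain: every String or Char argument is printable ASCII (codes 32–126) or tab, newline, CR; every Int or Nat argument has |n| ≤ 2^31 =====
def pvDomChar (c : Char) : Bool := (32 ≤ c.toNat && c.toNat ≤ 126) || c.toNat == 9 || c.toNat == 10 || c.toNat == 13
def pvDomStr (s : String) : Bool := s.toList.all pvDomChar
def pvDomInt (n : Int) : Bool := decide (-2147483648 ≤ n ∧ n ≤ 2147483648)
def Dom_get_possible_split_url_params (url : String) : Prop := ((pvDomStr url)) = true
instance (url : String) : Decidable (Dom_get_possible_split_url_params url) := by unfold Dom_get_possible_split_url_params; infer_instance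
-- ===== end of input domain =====

-- B replaces A's while-loop with its remaining/removed accumulators by a direct
-- comprehension over prefix lengths plus one positional insert for the trailing-slash
-- special case (objective: simpler; same asymptotic cost).

-- ===== PORT A =====
-- while-loop of A as recursion on `remaining` (shrinks via remaining[:-1])
def pvALoop (url : String) (split_url remaining removed : List String)
    (ret : List (String × Int × List String)) : List (String × Int × List String) :=
  if _h : remaining.length > 0 then
    let prefx := PySem.Str.join "/" remaining
    let pc : Int := (split_url.length : Int) - (remaining.length : Int)
    let params := PySem.List.slice removed none (some pc)
    let ret' := if (prefx ++ "/") == url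
      then (ret ++ [(prefx, pc, params)]) ++ [(prefx, pc - 1, PySem.List.slice removed none (some (pc - 1)))]
      else ret ++ [(prefx, pc, params)]
    pvALoop url split_url (PySem.List.slice remaining none (some (-1)))
      ((PySem.List.pyGet? remaining (-1)).getD "" :: removed) ret'
  else ret
termination_by remaining.length
decreasing_by
  rw [PySem.List.slice_to_neg_one]
  simp [List.length_dropLast]
  omega

def get_possible_split_url_params (url : String) : List (String × Int × List String) :=
  let split_url := (PySem.Str.split? url "/").getD []
  pvALoop url split_url split_url [] []

-- ===== PORT B =====
def get_possible_split_url_params_alt (url : String) : List (String × Int × List String) :=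
  let parts := (PySem.Str.split? url "/").getD []
  let n := parts.length
  let ret := (PySem.List.pyRange (n : Int) 0 (-1)).map
    (fun i => (PySem.Str.join "/" (PySem.List.slice parts none (some i)),
               (n : Int) - i, PySem.List.slice parts (some i) none))
  if n ≥ 2 ∧ ((PySem.List.pyGet? parts (-1)).getD "" == "") then
    PySem.List.insert ret 2 (PySem.Str.join "/" (PySem.List.slice parts none (some (-1))), 0, ([] : List String))
  else ret

-- ===== PRECONDITION & SPEC =====
def Spec_get_possible_split_url_params (url : String) (out : List (String × Int × List String)) : Prop := out = get_possible_split_url_params_alt url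
instance (url : String) (out : List (String × Int × List String)) : Decidable (Spec_get_possible_split_url_params url out) := by unfold Spec_get_possible_split_url_params; infer_instance

-- ===== CLAIM (what is proved, stated in full; the proofs are below) =====
def Claim_equal_get_possible_split_url_params : Prop := ∀ (url : String), Dom_get_possible_split_url_params url → Spec_get_possible_split_url_params url (get_possible_split_url_params url)

-- ===== LEMMAS AND PROOFS =====

-- the pieces A emits for prefix lengths k, k-1, …, 1 (in that order)
def pvGold (url : String) (parts : List String) : Nat → List (String × Int × List String)
  | 0 => []
  | (k+1) =>
    (if (PySem.Str.join "/" (parts.take (k+1)) ++ "/") == url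
     then [(PySem.Str.join "/" (parts.take (k+1)), (parts.length : Int) - (k+1 : Nat), parts.drop (k+1)),
           (PySem.Str.join "/" (parts.take (k+1)), (parts.length : Int) - (k+1 : Nat) - 1, (parts.drop (k+1)).dropLast)]
     else [(PySem.Str.join "/" (parts.take (k+1)), (parts.length : Int) - (k+1 : Nat), parts.drop (k+1))])
    ++ pvGold url parts k

theorem pvGo_zero (sep l cur : List Char) (acc : List (List Char)) :
    PySem.Chars.splitOn.go sep 0 l cur acc = ((cur.reverse ++ l) :: acc).reverse := by
  rw [PySem.Chars.splitOn.go.eq_def]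
theorem pvGo_nil (sep cur : List Char) (acc : List (List Char)) (f : Nat) :
    PySem.Chars.splitOn.go sep (f+1) [] cur acc = (cur.reverse :: acc).reverse := by
  rw [PySem.Chars.splitOn.go.eq_def]
theorem pvGo_cons (sep cur : List Char) (acc : List (List Char)) (f : Nat) (c : Char) (rest : List Char) :
    PySem.Chars.splitOn.go sep (f+1) (c :: rest) cur acc =
      if sep.isPrefixOf (c :: rest) then
        PySem.Chars.splitOn.go sep f (List.drop sep.length (c :: rest)) [] (cur.reverse :: acc)
      else PySem.Chars.splitOn.go sep f rest (c :: cur) acc := by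
  rw [PySem.Chars.splitOn.go.eq_def]

theorem pvGo_acc (sep : List Char) (f : Nat) (l cur : List Char) (acc : List (List Char)) :
    PySem.Chars.splitOn.go sep f l cur acc = acc.reverse ++ PySem.Chars.splitOn.go sep f l cur [] := by
  induction f generalizing l cur acc with
  | zero => simp [pvGo_zero]
  | succ f ih =>
    cases l with
    | nil => simp [pvGo_nil]
    | cons c rest =>
      rw [pvGo_cons, pvGo_cons]
      by_cases h : sep.isPrefixOf (c :: rest)
      · rw [if_pos h, if_pos h, ih _ _ (cur.reverse :: acc), ih _ _ [cur.reverse]]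
        simp
      · rw [if_neg h, if_neg h, ih rest (c :: cur) acc]

theorem pvGo_ne_nil (sep : List Char) (f : Nat) (l cur : List Char) :
    PySem.Chars.splitOn.go sep f l cur [] ≠ [] := by
  induction f generalizing l cur with
  | zero => simp [pvGo_zero]
  | succ f ih =>
    cases l with
    | nil => simp [pvGo_nil]
    | cons c rest =>
      rw [pvGo_cons]
      by_cases h : sep.isPrefixOf (c :: rest)
      · rw [if_pos h, pvGo_acc]
        simp
      · rw [if_neg h]
        exact ih rest (c :: cur)

theorem pvJoin_cons (sep p : List Char) (ps : List (List Char)) (h : ps ≠ []) :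
    PySem.Chars.join sep (p :: ps) = p ++ sep ++ PySem.Chars.join sep ps := by
  cases ps with
  | nil => exact absurd rfl h
  | cons q qs => rw [PySem.Chars.join_cons_cons]

theorem pvGo_join (sep : List Char) (f : Nat) (l cur : List Char) :
    PySem.Chars.join sep (PySem.Chars.splitOn.go sep f l cur []) = cur.reverse ++ l := by
  induction f generalizing l cur with
  | zero => simp [pvGo_zero, PySem.Chars.join_singleton]
  | succ f ih =>
    cases l with
    | nil => simp [pvGo_nil, PySem.Chars.join_singleton]
    | cons c rest =>
      rw [pvGo_cons]
      by_cases h : sep.isPrefixOf (c :: rest)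
      · rw [if_pos h, pvGo_acc]
        simp only [List.reverse_cons, List.reverse_nil, List.nil_append, List.singleton_append]
        rw [pvJoin_cons _ _ _ (pvGo_ne_nil sep f _ []), ih]
        have hpre : sep <+: (c :: rest) := List.isPrefixOf_iff_prefix.mp h
        obtain ⟨t, ht⟩ := hpre
        rw [← ht]
        simp
      · rw [if_neg h, ih rest (c :: cur)]
        simp

theorem pvJoin_splitOn (sep : List Char) (s : List Char) :
    PySem.Chars.join sep (PySem.Chars.splitOn s sep) = s := by
  unfold PySem.Chars.splitOn
  simpa using pvGo_join sep (s.length + 1) s []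

theorem pvSplitOn_ne_nil (sep s : List Char) : PySem.Chars.splitOn s sep ≠ [] := by
  unfold PySem.Chars.splitOn
  exact pvGo_ne_nil sep (s.length + 1) s []

theorem pvJoin_append (sep : List Char) (xs ys : List (List Char)) (hx : xs ≠ []) (hy : ys ≠ []) :
    PySem.Chars.join sep (xs ++ ys) = PySem.Chars.join sep xs ++ sep ++ PySem.Chars.join sep ys := by
  induction xs with
  | nil => exact absurd rfl hx
  | cons p ps ih =>
    cases ps with
    | nil =>
      simp only [List.singleton_append, PySem.Chars.join_singleton]
      exact pvJoin_cons sep p ys hy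
    | cons q qs =>
      rw [List.cons_append, pvJoin_cons sep p _ (by simp), PySem.Chars.join_cons_cons,
        ih (by simp)]
      simp

theorem pvJoin_eq_nil_iff (sep : List Char) (hsep : sep ≠ []) (ys : List (List Char)) :
    PySem.Chars.join sep ys = [] ↔ ys = [] ∨ ys = [[]] := by
  cases ys with
  | nil => simp [PySem.Chars.join_nil]
  | cons p ps =>
    cases ps with
    | nil => simp [PySem.Chars.join_singleton]
    | cons q qs =>
      rw [PySem.Chars.join_cons_cons]
      simp [hsep]

theorem pvSlice_pred_len {α : Type} (xs : List α) :
    PySem.List.slice xs none (some ((xs.length : Int) - 1)) = xs.dropLast := by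
  cases xs with
  | nil => simp [PySem.List.slice_to_neg_one]
  | cons x t =>
    have h : ((x :: t).length : Int) - 1 = ((t.length : Nat) : Int) := by simp
    rw [h, PySem.List.slice_to_natCast, List.dropLast_eq_take]
    simp


theorem pvPyGetNeg (ps : List String) (x : String) (h : ps.getLast? = some x) :
    PySem.List.pyGet? ps (-1) = some x := by
  obtain ⟨l', rfl⟩ := List.getLast?_eq_some_iff.mp h
  simp [PySem.List.pyGet?, PySem.List.pyIdx?]

theorem pvDropSingleton (ps : List String) (k : Nat) (hk : k < ps.length) :
    ps.drop k = [""] ↔ (k + 1 = ps.length ∧ ps.getLast? = some "") := by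
  constructor
  · intro h
    have hlen : ps.length - k = 1 := by
      have := congrArg List.length h
      simpa using this
    refine ⟨by omega, ?_⟩
    have : ps.getLast? = (ps.drop k).getLast? := by
      conv_lhs => rw [← List.take_append_drop k ps]
      rw [List.getLast?_append]
      simp [h]
    rw [this, h]
    rfl
  · rintro ⟨h1, h2⟩
    have hd : ps.drop k = [ps.getLast (by intro h; simp [h] at hk)] := by
      rw [List.drop_eq_getElem_cons hk]
      have : ps.drop (k+1) = [] := by simp [h1]
      rw [this]
      congr 1
      rw [List.getLast_eq_getElem]
      congr 1
      omega
    rw [hd]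
    rw [List.getLast?_eq_some_getLast (l := ps) (by intro h; simp [h] at hk)] at h2
    simp at h2
    simp [h2]

-- the trailing-slash condition characterised
theorem pvCondIff (url : String) (parts : List String)
    (hparts : parts.map String.toList = PySem.Chars.splitOn url.toList ['/'])
    (k : Nat) (hk1 : 1 ≤ k) (hk2 : k ≤ parts.length) :
    (PySem.Str.join "/" (parts.take k) ++ "/" = url) ↔
      (k + 1 = parts.length ∧ parts.getLast? = some "") := by
  have hurl : url.toList = PySem.Chars.join ['/'] (parts.map String.toList) := by
    rw [hparts, pvJoin_splitOn ['/'] url.toList]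
  have hsl : "/".toList = ['/'] := rfl
  rw [← String.toList_inj, String.toList_append, PySem.Str.toList_join, hsl, hurl]
  rcases Nat.lt_or_ge k parts.length with hlt | hge
  · -- k < parts.length
    have hsplit : parts.map String.toList
        = (parts.take k).map String.toList ++ (parts.drop k).map String.toList := by
      rw [← List.map_append, List.take_append_drop]
    rw [hsplit, pvJoin_append ['/'] _ _
        (by intro h; have := congrArg List.length h; simp at this
            rcases this with h0 | h0
            · omega
            · rw [h0] at hlt; simp at hlt)
        (by intro h; have := congrArg List.length h; simp at this; omega)]
    rw [List.append_assoc]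
    rw [List.append_cancel_left_eq]
    have hnil := pvJoin_eq_nil_iff ['/'] (by simp) ((parts.drop k).map String.toList)
    constructor
    · intro h
      have hjoin : PySem.Chars.join ['/'] ((parts.drop k).map String.toList) = [] := by
        have h2 := h
        rw [List.self_eq_append_right] at h2
        exact h2
      have := hnil.mp hjoin
      rcases this with h1 | h1
      · exfalso; have := congrArg List.length h1; simp at this; omega
      · have : parts.drop k = [""] := by
          have hmap : (parts.drop k).map String.toList = [[]] := h1
          cases hd : parts.drop k with
          | nil => simp [hd] at hmap
          | cons a t =>
            simp [hd] at hmap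
            obtain ⟨ha, ht⟩ := hmap
            have : a = "" := String.toList_inj.mp (by rw [ha])
            simp [this, ht]
        exact (pvDropSingleton parts k hlt).mp this
    · intro h
      have hdrop : parts.drop k = [""] := (pvDropSingleton parts k hlt).mpr h
      rw [hdrop]
      rw [List.map_cons, List.map_nil]
      rw [PySem.Chars.join_singleton]
      rfl
  · -- k = parts.length
    have hk : k = parts.length := le_antisymm hk2 hge
    subst hk
    simp only [List.take_length]
    constructor
    · intro h
      have := congrArg List.length h
      simp at this
    · rintro ⟨h, -⟩
      omega

-- A's loop produces pvGold
theorem pvPyGetLastAppend (ys : List String) (x : String) :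
    PySem.List.pyGet? (ys ++ [x]) (-1) = some x := by
  simp [PySem.List.pyGet?, PySem.List.pyIdx?]

theorem pvALoopSpec (url : String) (parts : List String) (k : Nat) (hk : k ≤ parts.length)
    (ret : List (String × Int × List String)) :
    pvALoop url parts (parts.take k) (parts.drop k) ret = ret ++ pvGold url parts k := by
  induction k generalizing ret with
  | zero =>
    rw [pvALoop]
    simp [pvGold]
  | succ k ih =>
    have hklt : k < parts.length := by omega
    have hlen : (parts.take (k+1)).length = k + 1 := by simp; omega
    have e1 : (parts.length : Int) - ((parts.take (k+1)).length : Int)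
        = (((parts.length - (k+1) : Nat)) : Int) := by rw [hlen]; push_cast; omega
    have e2 : PySem.List.slice (parts.drop (k+1)) none (some ((parts.length : Int) - ((parts.take (k+1)).length : Int)))
        = parts.drop (k+1) := by
      rw [e1, PySem.List.slice_to_natCast]
      exact List.take_of_length_le (by simp)
    have e3 : PySem.List.slice (parts.drop (k+1)) none (some ((parts.length : Int) - ((parts.take (k+1)).length : Int) - 1))
        = (parts.drop (k+1)).dropLast := by
      rw [show (parts.length : Int) - ((parts.take (k+1)).length : Int) - 1
            = ((parts.drop (k+1)).length : Int) - 1 by rw [hlen]; simp; omega]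
      exact pvSlice_pred_len _
    have e4 : PySem.List.slice (parts.take (k+1)) none (some (-1)) = parts.take k := by
      rw [PySem.List.slice_to_neg_one, List.dropLast_eq_take, hlen]
      simp [List.take_take]
    have htk : parts.take (k+1) = parts.take k ++ [parts[k]] := by
      rw [List.take_add_one]
      simp [List.getElem?_eq_getElem hklt]
    have e5 : (PySem.List.pyGet? (parts.take (k+1)) (-1)).getD "" = parts[k] := by
      rw [htk, pvPyGetLastAppend]
      rfl
    have e6 : parts[k] :: parts.drop (k+1) = parts.drop k := List.getElem_cons_drop ..
    rw [pvALoop]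
    rw [dif_pos (by rw [hlen]; omega)]
    simp only [e2, e3, e4, e5, e6]
    rw [ih (by omega)]
    by_cases hcond : (PySem.Str.join "/" (parts.take (k+1)) ++ "/") == url
    · simp only [hcond, if_pos, pvGold, hlen]
      simp [List.append_assoc]
    · simp only [Bool.not_eq_true] at hcond
      simp only [hcond, pvGold, hlen]
      simp [List.append_assoc]

theorem pvGoldMap (url : String) (ps : List String) (k : Nat) (hk : k ≤ ps.length)
    (hc : ∀ j, 1 ≤ j → j ≤ k → ¬(PySem.Str.join "/" (ps.take j) ++ "/" = url)) :
    pvGold url ps k = (PySem.List.pyRange (k : Int) 0 (-1)).map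
      (fun i => (PySem.Str.join "/" (PySem.List.slice ps none (some i)),
                 (ps.length : Int) - i, PySem.List.slice ps (some i) none)) := by
  induction k with
  | zero => simp [pvGold, PySem.List.pyRange_neg_one_eq_nil]
  | succ k ih =>
    rw [PySem.List.pyRange_neg_one_cons (by push_cast; omega), List.map_cons]
    rw [show ((k+1 : Nat) : Int) - 1 = (k : Int) by push_cast; ring]
    rw [← ih (by omega) (fun j h1 h2 => hc j h1 (by omega))]
    have hcond : (PySem.Str.join "/" (ps.take (k+1)) ++ "/" == url) = false := by
      rw [beq_eq_false_iff_ne]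
      exact hc (k+1) (by omega) (by omega)
    simp only [pvGold, hcond, Bool.false_eq_true, if_false]
    rw [PySem.List.slice_to_natCast, PySem.List.slice_from_natCast]
    simp

theorem pvSplitParts (url : String) :
    ∃ ps, PySem.Str.split? url "/" = some ps ∧
      ps.map String.toList = PySem.Chars.splitOn url.toList ['/'] := by
  have h := PySem.Str.split?_map url "/"
  rw [show ("/" : String).toList = ['/'] from rfl] at h
  rw [PySem.Chars.split?] at h
  simp only [List.isEmpty_cons, Bool.false_eq_true, if_false] at h
  cases hs : PySem.Str.split? url "/" with
  | none => rw [hs] at h; simp at h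
  | some ps =>
    rw [hs] at h
    simp only [Option.map_some, Option.some.injEq] at h
    exact ⟨ps, rfl, h⟩

-- ===== VERDICT (by name: the statement is the Claim_ definition above) =====
theorem get_possible_split_url_params_spec : Claim_equal_get_possible_split_url_params := by
  intro url _
  unfold Spec_get_possible_split_url_params
  unfold get_possible_split_url_params get_possible_split_url_params_alt
  obtain ⟨ps, hps, hmap⟩ := pvSplitParts url
  rw [hps]
  simp only [Option.getD_some]
  have hA : pvALoop url ps ps [] [] = pvGold url ps ps.length := by
    have h := pvALoopSpec url ps ps.length (le_refl _) []
    rw [List.take_length, List.drop_length] at h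
    simpa using h
  rw [hA]
  have hn1 : 1 ≤ ps.length := by
    have := pvSplitOn_ne_nil ['/'] url.toList
    rw [← hmap] at this
    cases ps with
    | nil => simp at this
    | cons a t => simp
  by_cases hc : 2 ≤ ps.length ∧ ps.getLast? = some ""
  · obtain ⟨hn2, hlast⟩ := hc
    rw [if_pos ⟨hn2, by rw [pvPyGetNeg ps "" hlast]; rfl⟩]
    obtain ⟨m, hm⟩ : ∃ m, ps.length = m + 2 := ⟨ps.length - 2, by omega⟩
    -- unfold the two descending range steps on the B side
    rw [PySem.List.pyRange_neg_one_cons (by omega),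
        PySem.List.pyRange_neg_one_cons (by omega),
        List.map_cons, List.map_cons]
    rw [PySem.List.insert_ofNat _ 2 _ (by simp)]
    have eT0 : PySem.List.slice ps none (some (ps.length : Int)) = ps := by
      rw [PySem.List.slice_to_natCast]; simp
    have eF0 : PySem.List.slice ps (some (ps.length : Int)) none = [] := by
      rw [PySem.List.slice_from_natCast]; simp
    have eM : ((ps.length : Int) - 1) = ((m+1 : Nat) : Int) := by rw [hm]; push_cast; ring
    have eR : ((ps.length : Int) - 1 - 1) = ((m : Nat) : Int) := by rw [hm]; push_cast; ring
    have eT1 : PySem.List.slice ps none (some ((ps.length : Int) - 1)) = ps.take (m+1) := by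
      rw [eM, PySem.List.slice_to_natCast]
    have eF1 : PySem.List.slice ps (some ((ps.length : Int) - 1)) none = ps.drop (m+1) := by
      rw [eM, PySem.List.slice_from_natCast]
    have eNeg : PySem.List.slice ps none (some (-1)) = ps.take (m+1) := by
      rw [PySem.List.slice_to_neg_one, List.dropLast_eq_take, hm]
      norm_num
    have eInt1 : (ps.length : Int) - ((ps.length : Int) - 1) = 1 := by ring
    have etake2 : ps.take (m+2) = ps := List.take_of_length_le (by omega)
    have hctop : (PySem.Str.join "/" ps ++ "/" == url) = false := by
      rw [beq_eq_false_iff_ne]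
      intro h
      have := (pvCondIff url ps hmap (m+2) (by omega) (by omega)).mp (by rw [etake2]; exact h)
      omega
    have hcmid : (PySem.Str.join "/" (ps.take (m+1)) ++ "/" == url) = true := by
      rw [beq_iff_eq]
      exact (pvCondIff url ps hmap (m+1) (by omega) (by omega)).mpr ⟨by omega, hlast⟩
    have egoldm := pvGoldMap url ps m (by omega) (fun j h1 h2 => by
      rw [pvCondIff url ps hmap j h1 (by omega)]
      rintro ⟨hj, -⟩
      omega)
    have edrop2 : ps.drop (m+2) = [] := by
      rw [List.drop_eq_nil_iff]
      omega
    have edrop1last : (ps.drop (m+1)).dropLast = [] := by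
      rw [List.dropLast_eq_take]
      simp [hm]
    have eZ1 : (ps.length : Int) - ((m+1+1 : Nat) : Int) = 0 := by rw [hm]; ring
    have eZ2 : (ps.length : Int) - ((m+1 : Nat) : Int) = 1 := by rw [hm]; omega
    have etk : ∀ (x y : String × Int × List String) (l : List (String × Int × List String)),
        List.take 2 (x :: y :: l) = [x, y] := fun _ _ _ => rfl
    have edp : ∀ (x y : String × Int × List String) (l : List (String × Int × List String)),
        List.drop 2 (x :: y :: l) = l := fun _ _ _ => rfl
    rw [show pvGold url ps ps.length = pvGold url ps (m+2) by rw [hm]]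
    simp only [pvGold, hctop, hcmid, Bool.false_eq_true, if_false, if_pos, egoldm, eT0, eF0,
      eT1, eF1, eNeg, eR, eInt1, etake2, edrop2, edrop1last, eZ1, eZ2, sub_self, etk, edp]
    simp
  · rw [if_neg (by
      rintro ⟨h2, hb⟩
      apply hc
      refine ⟨h2, ?_⟩
      have hne : ps ≠ [] := by intro h; rw [h] at hn1; simp at hn1
      obtain ⟨l', x, hx⟩ := List.eq_nil_or_concat ps |>.resolve_left hne
      subst hx
      simp [PySem.List.pyGet?, PySem.List.pyIdx?] at hb
      simp [hb])]
    exact pvGoldMap url ps ps.length le_rfl (fun j h1 h2 => by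
      rw [pvCondIff url ps hmap j h1 h2]
      rintro ⟨hj, hl⟩
      exact hc ⟨by omega, hl⟩)
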